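-- pv_equiv track=rewrite | github.com/jainsiddharth99/Competitive_Programming | Job OA-Interview/Zeld Tech/zeld tech OA.py | solution
-- ===== SOURCE A (Python) =====
-- def solution(A):
--     # write your code in Python 3.6
--     res = 0
--     if cutting(A):
--         return 0
--
--     for i in range(len(A)):
--         s = A[:i]+A[i+1:]
--         if cutting(s):
--             res += 1
--     return res if res != 0 else -1
--
-- def cutting(A):
--     for i in range(1, len(A)-1):
--         if (A[i-1] <= A[i] <= A[i+1]) or (A[i-1] >= A[i] >= A[i+1]):
--             return False
--     return True
-- ===== SOURCE B (Python) =====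
-- def solution(A):
--     # O(n): collect centers of monotone triples once; a single deletion can only
--     # fix triples it touches, so only a window of at most five candidate indices
--     # needs testing, each in O(1) via the two junction triples.
--     n = len(A)
--     bad = [i for i in range(1, n - 1)
--            if A[i-1] <= A[i] <= A[i+1] or A[i-1] >= A[i] >= A[i+1]]
--     if not bad:
--         return 0
--     lo, hi = bad[0], bad[-1]
--     if hi - lo > 2:
--         return -1
--     res = 0
--     for j in range(max(lo - 1, 0), hi + 2):
--         if lo >= j - 1 and hi <= j + 1 \
--            and not (2 <= j <= n - 2 and (A[j-2] <= A[j-1] <= A[j+1] or A[j-2] >= A[j-1] >= A[j+1])) \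
--            and not (1 <= j <= n - 3 and (A[j-1] <= A[j+1] <= A[j+2] or A[j-1] >= A[j+1] >= A[j+2])):
--             res += 1
--     return res if res != 0 else -1
-- ===== Notes on version B (the rewrite author's own statement) =====
-- stated objective: faster
-- what changed: Instead of slicing out each index and re-scanning the whole list (O(n^2)), B collects the centers of monotone triples in one pass; a deletion can only fix triples it touches, so only a window of at most five candidate indices around the bad centers is tested, each in O(1) via the two junction triples.
import Mathlib
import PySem

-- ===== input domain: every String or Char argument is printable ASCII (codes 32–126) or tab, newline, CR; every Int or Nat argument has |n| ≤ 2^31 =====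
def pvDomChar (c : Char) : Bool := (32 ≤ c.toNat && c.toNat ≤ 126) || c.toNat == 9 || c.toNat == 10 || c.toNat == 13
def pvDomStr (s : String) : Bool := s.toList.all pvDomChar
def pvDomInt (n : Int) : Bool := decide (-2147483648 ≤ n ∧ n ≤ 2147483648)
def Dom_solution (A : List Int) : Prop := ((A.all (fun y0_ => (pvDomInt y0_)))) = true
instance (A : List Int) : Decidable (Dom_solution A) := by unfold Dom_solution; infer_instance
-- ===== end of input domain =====

-- B replaces A's quadratic try-every-deletion scan by a one-pass collection of monotone-triple
-- centers plus an O(1) membership/junction test on at most five candidate deletions (objective: faster).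


-- ===== PORT A =====
-- the chained comparison 'a <= b <= c or a >= b >= c' (shared verbatim by both Pythons)
def pvMono (a b c : Int) : Bool :=
  (decide (a ≤ b) && decide (b ≤ c)) || (decide (a ≥ b) && decide (b ≥ c))

def cutting (A : List Int) : Bool :=
  (PySem.List.pyRange 1 ((A.length : Int) - 1) 1).all fun i =>
    !(pvMono (PySem.List.pyGetD A (i-1) 0) (PySem.List.pyGetD A i 0) (PySem.List.pyGetD A (i+1) 0))

def solution (A : List Int) : Int :=
  if cutting A then 0
  else
    let res := (PySem.List.pyRange 0 (A.length : Int) 1).foldl (fun res i =>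
      let s := PySem.List.slice A none (some i) ++ PySem.List.slice A (some (i+1)) none
      if cutting s then res + 1 else res) 0
    if res ≠ 0 then res else -1

-- ===== PORT B =====
def solution_alt (A : List Int) : Int :=
  let n : Int := A.length
  let bad := (PySem.List.pyRange 1 (n-1) 1).filter fun i =>
    pvMono (PySem.List.pyGetD A (i-1) 0) (PySem.List.pyGetD A i 0) (PySem.List.pyGetD A (i+1) 0)
  if bad = [] then 0
  else
    let lo := PySem.List.pyGetD bad 0 0
    let hi := PySem.List.pyGetD bad (-1) 0
    if hi - lo > 2 then -1
    else
      let res := (PySem.List.pyRange (max (lo-1) 0) (hi+2) 1).foldl (fun res j =>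
        if lo ≥ j - 1 ∧ hi ≤ j + 1
           ∧ ¬(2 ≤ j ∧ j ≤ n - 2 ∧ pvMono (PySem.List.pyGetD A (j-2) 0) (PySem.List.pyGetD A (j-1) 0) (PySem.List.pyGetD A (j+1) 0) = true)
           ∧ ¬(1 ≤ j ∧ j ≤ n - 3 ∧ pvMono (PySem.List.pyGetD A (j-1) 0) (PySem.List.pyGetD A (j+1) 0) (PySem.List.pyGetD A (j+2) 0) = true)
        then res + 1 else res) 0
      if res ≠ 0 then res else -1

-- ===== PRECONDITION & SPEC =====
def Spec_solution (A : List Int) (out : Int) : Prop := out = solution_alt A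
instance (A : List Int) (out : Int) : Decidable (Spec_solution A out) := by unfold Spec_solution; infer_instance

-- ===== CLAIM (what is proved, stated in full; the proofs are below) =====
def Claim_equal_solution : Prop := ∀ (A : List Int), Dom_solution A → Spec_solution A (solution A)

-- ===== LEMMAS AND PROOFS =====

def mAt (A : List Int) (k : Nat) : Bool :=
  pvMono (A.getD (k-1) 0) (A.getD k 0) (A.getD (k+1) 0)

def delL (A : List Int) (j : Nat) : List Int := A.take j ++ A.drop (j+1)

theorem triple_cast (A : List Int) (k : Nat) (hk : 1 ≤ k) :
    pvMono (PySem.List.pyGetD A ((k:Int)-1) 0) (PySem.List.pyGetD A (k:Int) 0) (PySem.List.pyGetD A ((k:Int)+1) 0) = mAt A k := by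
  have h1 : ((k:Int)) - 1 = ((k-1 : Nat) : Int) := by omega
  have h2 : ((k:Int)) + 1 = ((k+1 : Nat) : Int) := by push_cast; ring
  rw [h1, h2]
  simp only [mAt, PySem.List.pyGetD_natCast]

theorem cutting_iff (A : List Int) :
    cutting A = true ↔ ∀ k : Nat, 1 ≤ k → k + 1 < A.length → mAt A k = false := by
  unfold cutting
  rw [List.all_eq_true]
  constructor
  · intro h k hk1 hk2
    have hm : (k:Int) ∈ PySem.List.pyRange 1 ((A.length:Int) - 1) 1 := by
      rw [PySem.List.mem_pyRange_one]; omega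
    have := h _ hm
    simp only [Bool.not_eq_eq_eq_not, Bool.not_true] at this
    rwa [triple_cast A k hk1] at this
  · intro h i hi
    rw [PySem.List.mem_pyRange_one] at hi
    have hk : i = ((i.toNat : Nat) : Int) := by omega
    rw [hk, triple_cast A i.toNat (by omega)]
    simp only [Bool.not_eq_eq_eq_not, Bool.not_true]
    exact h i.toNat (by omega) (by omega)

theorem delL_length (A : List Int) (j : Nat) (h : j < A.length) :
    (delL A j).length = A.length - 1 := by
  simp [delL]; omega

theorem delL_getD (A : List Int) (j k : Nat) (hj : j < A.length) (hk : k < A.length - 1) :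
    (delL A j).getD k 0 = if k < j then A.getD k 0 else A.getD (k+1) 0 := by
  have hlt : (List.take j A).length = j := by simp; omega
  simp only [delL, List.getD_eq_getElem?_getD]
  by_cases h1 : k < j
  · rw [if_pos h1, List.getElem?_append_left (by omega), List.getElem?_take_of_lt h1]
  · rw [if_neg h1, List.getElem?_append_right (by omega), List.getElem?_drop, hlt]
    congr 2
    omega

theorem mAt_delL (A : List Int) (j k : Nat) (hj : j < A.length) (hk1 : 1 ≤ k)
    (hk2 : k + 2 < A.length) :
    mAt (delL A j) k =
      if k + 1 < j then mAt A k
      else if k + 1 = j then pvMono (A.getD (k-1) 0) (A.getD k 0) (A.getD (k+2) 0)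
      else if k = j then pvMono (A.getD (k-1) 0) (A.getD (k+1) 0) (A.getD (k+2) 0)
      else mAt A (k+1) := by
  unfold mAt
  rw [delL_getD A j (k-1) hj (by omega), delL_getD A j k hj (by omega),
      delL_getD A j (k+1) hj (by omega)]
  split_ifs <;> first
    | rfl
    | omega
    | (congr 2 <;> omega)

theorem cutting_delL (A : List Int) (j : Nat) (hj : j < A.length) :
    cutting (delL A j) = true ↔
      ((∀ k : Nat, 1 ≤ k → k + 1 < A.length → mAt A k = true → (j ≤ k + 1 ∧ k ≤ j + 1))
       ∧ ¬(2 ≤ j ∧ j + 2 ≤ A.length ∧ pvMono (A.getD (j-2) 0) (A.getD (j-1) 0) (A.getD (j+1) 0) = true)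
       ∧ ¬(1 ≤ j ∧ j + 3 ≤ A.length ∧ pvMono (A.getD (j-1) 0) (A.getD (j+1) 0) (A.getD (j+2) 0) = true)) := by
  rw [cutting_iff]
  have hlen := delL_length A j hj
  constructor
  · intro H
    refine ⟨?_, ?_, ?_⟩
    · intro k hk1 hk2 hbad
      by_contra hc
      push_neg at hc
      by_cases hlt : k + 1 < j
      · have := H k hk1 (by omega)
        rw [mAt_delL A j k hj hk1 (by omega), if_pos hlt] at this
        exact absurd hbad (by simp [this])
      · -- then k ≥ j + 2
        have hk2' : j + 2 ≤ k := by omega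
        have := H (k-1) (by omega) (by omega)
        rw [mAt_delL A j (k-1) hj (by omega) (by omega)] at this
        rw [if_neg (by omega), if_neg (by omega), if_neg (by omega)] at this
        have hkk : k - 1 + 1 = k := by omega
        rw [hkk] at this
        exact absurd hbad (by simp [this])
    · rintro ⟨h2, hlen2, hm⟩
      have := H (j-1) (by omega) (by omega)
      rw [mAt_delL A j (j-1) hj (by omega) (by omega)] at this
      rw [if_neg (by omega), if_pos (by omega)] at this
      have e1 : j - 1 - 1 = j - 2 := by omega
      have e2 : j - 1 + 2 = j + 1 := by omega
      rw [e1, e2] at this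
      rw [hm] at this
      exact absurd this (by simp)
    · rintro ⟨h1, hlen3, hm⟩
      have := H j (by omega) (by omega)
      rw [mAt_delL A j j hj (by omega) (by omega)] at this
      rw [if_neg (by omega), if_neg (by omega), if_pos rfl] at this
      rw [hm] at this
      exact absurd this (by simp)
  · rintro ⟨H1, H2, H3⟩ k hk1 hk2
    rw [hlen] at hk2
    rw [mAt_delL A j k hj hk1 (by omega)]
    split_ifs with h1 h2 h3
    · by_contra hc
      have := H1 k hk1 (by omega) (by simpa using hc)
      omega
    · by_contra hc
      exact H2 ⟨by omega, by omega, by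
        have e1 : j - 2 = k - 1 := by omega
        have e2 : j - 1 = k := by omega
        have e3 : j + 1 = k + 2 := by omega
        rw [e1, e2, e3]; simpa using hc⟩
    · by_contra hc
      subst h3
      exact H3 ⟨by omega, by omega, by simpa using hc⟩
    · by_contra hc
      have := H1 (k+1) (by omega) (by omega) (by simpa using hc)
      omega


def badL (A : List Int) : List Int :=
  (PySem.List.pyRange 1 ((A.length : Int) - 1) 1).filter fun i =>
    pvMono (PySem.List.pyGetD A (i-1) 0) (PySem.List.pyGetD A i 0) (PySem.List.pyGetD A (i+1) 0)

theorem pyGetD_int (A : List Int) (i : Int) (h : 0 ≤ i) :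
    PySem.List.pyGetD A i 0 = A.getD i.toNat 0 := by
  conv_lhs => rw [show i = ((i.toNat : Nat) : Int) from by omega]
  exact PySem.List.pyGetD_natCast A i.toNat 0

theorem mem_badL (A : List Int) (x : Int) :
    x ∈ badL A ↔ 1 ≤ x ∧ x + 1 < (A.length : Int) ∧ mAt A x.toNat = true := by
  unfold badL
  rw [List.mem_filter, PySem.List.mem_pyRange_one]
  constructor
  · rintro ⟨⟨h1, h2⟩, hm⟩
    refine ⟨h1, by omega, ?_⟩
    have hx : x = ((x.toNat : Nat) : Int) := by omega
    rw [hx, triple_cast A x.toNat (by omega)] at hm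
    exact hm
  · rintro ⟨h1, h2, hm⟩
    refine ⟨⟨h1, by omega⟩, ?_⟩
    have hx : x = ((x.toNat : Nat) : Int) := by omega
    rw [hx, triple_cast A x.toNat (by omega)]
    exact hm

theorem badL_nil_iff (A : List Int) : badL A = [] ↔ cutting A = true := by
  rw [cutting_iff, List.eq_nil_iff_forall_not_mem]
  constructor
  · intro h k hk1 hk2
    by_contra hc
    exact h (k : Int) ((mem_badL A k).mpr ⟨by omega, by omega, by simpa using hc⟩)
  · intro h x hx
    rw [mem_badL] at hx
    obtain ⟨h1, h2, hm⟩ := hx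
    have := h x.toNat (by omega) (by omega)
    rw [this] at hm
    exact absurd hm (by simp)

theorem badL_pairwise (A : List Int) : (badL A).Pairwise (· < ·) := by
  exact List.Pairwise.filter _ (PySem.List.pairwise_lt_pyRange_one 1 ((A.length : Int) - 1))

theorem pairwise_le_getLast {l : List Int} (hp : l.Pairwise (· < ·)) (h : l ≠ []) :
    ∀ x ∈ l, x ≤ l.getLast h := by
  induction l with
  | nil => simp at h
  | cons a t ih =>
    intro x hx
    rcases List.mem_cons.mp hx with rfl | hxt
    · cases t with
      | nil => simp
      | cons b u =>
        rw [List.getLast_cons (by simp)]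
        have hb : x < (b :: u).getLast (by simp) :=
          List.rel_of_pairwise_cons hp (List.getLast_mem _)
        omega
    · cases t with
      | nil => simp at hxt
      | cons b u =>
        rw [List.getLast_cons (by simp)]
        exact ih hp.of_cons (by simp) x hxt

theorem cntfold_congr (l : List Int) (p q : Int → Prop) [DecidablePred p] [DecidablePred q]
    (h : ∀ x ∈ l, p x ↔ q x) (acc : Int) :
    l.foldl (fun r i => if p i then r+1 else r) acc
      = l.foldl (fun r i => if q i then r+1 else r) acc := by
  induction l generalizing acc with
  | nil => rfl
  | cons x t ih =>
    simp only [List.foldl_cons]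
    have hx := h x (List.mem_cons_self)
    by_cases hp : p x
    · rw [if_pos hp, if_pos (hx.mp hp)]
      exact ih (fun y hy => h y (List.mem_cons_of_mem _ hy)) _
    · rw [if_neg hp, if_neg (fun hq => hp (hx.mpr hq))]
      exact ih (fun y hy => h y (List.mem_cons_of_mem _ hy)) _

theorem cntfold_false (l : List Int) (p : Int → Prop) [DecidablePred p]
    (h : ∀ x ∈ l, ¬ p x) (acc : Int) :
    l.foldl (fun r i => if p i then r+1 else r) acc = acc := by
  induction l generalizing acc with
  | nil => rfl
  | cons x t ih =>
    simp only [List.foldl_cons]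
    rw [if_neg (h x List.mem_cons_self)]
    exact ih (fun y hy => h y (List.mem_cons_of_mem _ hy)) _

theorem slice_delL (A : List Int) (i : Int) (h0 : 0 ≤ i) :
    PySem.List.slice A none (some i) ++ PySem.List.slice A (some (i+1)) none
      = delL A i.toNat := by
  rw [PySem.List.slice_to A h0, PySem.List.slice_from A (by omega)]
  unfold delL
  congr 2
  omega

theorem del_iff_q (A : List Int) (lo hi : Int)
    (hmem : ∀ k : Nat, 1 ≤ k → k + 1 < A.length → mAt A k = true → lo ≤ (k:Int) ∧ (k:Int) ≤ hi)
    (hlo : 1 ≤ lo ∧ lo + 1 < (A.length : Int) ∧ mAt A lo.toNat = true)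
    (hhi : 1 ≤ hi ∧ hi + 1 < (A.length : Int) ∧ mAt A hi.toNat = true)
    (i : Int) (h0 : 0 ≤ i) (hn : i < (A.length : Int)) :
    (cutting (delL A i.toNat) = true) ↔
      (lo ≥ i - 1 ∧ hi ≤ i + 1
       ∧ ¬(2 ≤ i ∧ i ≤ (A.length : Int) - 2 ∧ pvMono (PySem.List.pyGetD A (i-2) 0) (PySem.List.pyGetD A (i-1) 0) (PySem.List.pyGetD A (i+1) 0) = true)
       ∧ ¬(1 ≤ i ∧ i ≤ (A.length : Int) - 3 ∧ pvMono (PySem.List.pyGetD A (i-1) 0) (PySem.List.pyGetD A (i+1) 0) (PySem.List.pyGetD A (i+2) 0) = true)) := by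
  obtain ⟨hlo1, hlo2, hlom⟩ := hlo
  obtain ⟨hhi1, hhi2, hhim⟩ := hhi
  rw [cutting_delL A i.toNat (by omega)]
  have e1 : (i-2).toNat = i.toNat - 2 := by omega
  have e2 : (i-1).toNat = i.toNat - 1 := by omega
  have e3 : (i+1).toNat = i.toNat + 1 := by omega
  have e4 : (i+2).toNat = i.toNat + 2 := by omega
  constructor
  · rintro ⟨H1, H2, H3⟩
    have hL := H1 lo.toNat (by omega) (by omega) (by simpa using hlom)
    have hH := H1 hi.toNat (by omega) (by omega) (by simpa using hhim)
    refine ⟨by omega, by omega, ?_, ?_⟩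
    · rintro ⟨g1, g2, gm⟩
      exact H2 ⟨by omega, by omega, by
        rw [pyGetD_int _ _ (by omega), pyGetD_int _ _ (by omega), pyGetD_int _ _ (by omega),
            e1, e2, e3] at gm
        exact gm⟩
    · rintro ⟨g1, g2, gm⟩
      exact H3 ⟨by omega, by omega, by
        rw [pyGetD_int _ _ (by omega), pyGetD_int _ _ (by omega), pyGetD_int _ _ (by omega),
            e2, e3, e4] at gm
        exact gm⟩
  · rintro ⟨W1, W2, G1, G2⟩
    refine ⟨?_, ?_, ?_⟩
    · intro k hk1 hk2 hm
      have := hmem k hk1 hk2 hm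
      omega
    · rintro ⟨g1, g2, gm⟩
      exact G1 ⟨by omega, by omega, by
        rw [pyGetD_int _ _ (by omega), pyGetD_int _ _ (by omega), pyGetD_int _ _ (by omega),
            e1, e2, e3]
        exact gm⟩
    · rintro ⟨g1, g2, gm⟩
      exact G2 ⟨by omega, by omega, by
        rw [pyGetD_int _ _ (by omega), pyGetD_int _ _ (by omega), pyGetD_int _ _ (by omega),
            e2, e3, e4]
        exact gm⟩

def cntA (A : List Int) : Int :=
  (PySem.List.pyRange 0 (A.length : Int) 1).foldl (fun res i =>
    if cutting (PySem.List.slice A none (some i) ++ PySem.List.slice A (some (i+1)) none) = true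
    then res + 1 else res) 0

def cntB (A : List Int) (lo hi : Int) : Int :=
  (PySem.List.pyRange (max (lo-1) 0) (hi+2) 1).foldl (fun res j =>
    if lo ≥ j - 1 ∧ hi ≤ j + 1
     ∧ ¬(2 ≤ j ∧ j ≤ (A.length : Int) - 2 ∧ pvMono (PySem.List.pyGetD A (j-2) 0) (PySem.List.pyGetD A (j-1) 0) (PySem.List.pyGetD A (j+1) 0) = true)
     ∧ ¬(1 ≤ j ∧ j ≤ (A.length : Int) - 3 ∧ pvMono (PySem.List.pyGetD A (j-1) 0) (PySem.List.pyGetD A (j+1) 0) (PySem.List.pyGetD A (j+2) 0) = true)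
    then res + 1 else res) 0

theorem sol_body (A : List Int) :
    solution A = if cutting A = true then 0 else if cntA A ≠ 0 then cntA A else -1 := rfl

theorem alt_body (A : List Int) :
    solution_alt A =
      if badL A = [] then 0
      else
        if (PySem.List.pyGetD (badL A) (-1) 0) - (PySem.List.pyGetD (badL A) 0 0) > 2 then -1
        else
          if cntB A (PySem.List.pyGetD (badL A) 0 0) (PySem.List.pyGetD (badL A) (-1) 0) ≠ 0
          then cntB A (PySem.List.pyGetD (badL A) 0 0) (PySem.List.pyGetD (badL A) (-1) 0)
          else -1 := rfl

theorem solution_eq (A : List Int) : solution A = solution_alt A := by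
  rw [sol_body, alt_body]
  by_cases hcut : cutting A = true
  · rw [if_pos hcut, if_pos ((badL_nil_iff A).mpr hcut)]
  · have hbne : badL A ≠ [] := fun h => hcut ((badL_nil_iff A).mp h)
    rw [if_neg hcut, if_neg hbne]
    obtain ⟨b0, bt, hbeq⟩ : ∃ b0 bt, badL A = b0 :: bt := by
      cases h : badL A with
      | nil => exact absurd h hbne
      | cons x t => exact ⟨x, t, rfl⟩
    set lo := PySem.List.pyGetD (badL A) 0 0 with hlo_def
    set hi := PySem.List.pyGetD (badL A) (-1) 0 with hhi_def
    have hlomem : lo ∈ badL A := by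
      rw [hlo_def, hbeq, PySem.List.pyGetD_zero_cons]
      exact List.mem_cons_self
    have hhieq : hi = (badL A).getLast hbne := PySem.List.pyGetD_neg_one (badL A) 0 hbne
    have hhimem : hi ∈ badL A := by rw [hhieq]; exact List.getLast_mem _
    have hmin : ∀ x ∈ badL A, lo ≤ x := by
      intro x hx
      rw [hlo_def, hbeq, PySem.List.pyGetD_zero_cons]
      rw [hbeq] at hx
      rcases List.mem_cons.mp hx with rfl | h
      · exact le_refl x
      · exact le_of_lt (List.rel_of_pairwise_cons (hbeq ▸ badL_pairwise A) h)
    have hmax : ∀ x ∈ badL A, x ≤ hi := by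
      intro x hx
      rw [hhieq]
      exact pairwise_le_getLast (badL_pairwise A) hbne x hx
    have hloP := (mem_badL A lo).mp hlomem
    have hhiP := (mem_badL A hi).mp hhimem
    have hlohi : lo ≤ hi := hmax lo hlomem
    have hmem : ∀ k : Nat, 1 ≤ k → k + 1 < A.length → mAt A k = true →
        lo ≤ (k:Int) ∧ (k:Int) ≤ hi := by
      intro k h1 h2 hm
      have hk : (k : Int) ∈ badL A := (mem_badL A (k:Int)).mpr ⟨by omega, by omega, by simpa using hm⟩
      exact ⟨hmin _ hk, hmax _ hk⟩
    -- A's counter equals a count of the window predicate over the full index range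
    have hA1 : cntA A = (PySem.List.pyRange 0 (A.length : Int) 1).foldl
        (fun r i =>
        if lo ≥ i - 1 ∧ hi ≤ i + 1
     ∧ ¬(2 ≤ i ∧ i ≤ (A.length : Int) - 2 ∧ pvMono (PySem.List.pyGetD A (i-2) 0) (PySem.List.pyGetD A (i-1) 0) (PySem.List.pyGetD A (i+1) 0) = true)
     ∧ ¬(1 ≤ i ∧ i ≤ (A.length : Int) - 3 ∧ pvMono (PySem.List.pyGetD A (i-1) 0) (PySem.List.pyGetD A (i+1) 0) (PySem.List.pyGetD A (i+2) 0) = true)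
        then r + 1 else r) 0 := by
      unfold cntA
      apply cntfold_congr (p := fun i => cutting (PySem.List.slice A none (some i) ++ PySem.List.slice A (some (i+1)) none) = true)
      intro x hx
      rw [PySem.List.mem_pyRange_one] at hx
      rw [slice_delL A x hx.1]
      exact del_iff_q A lo hi hmem hloP hhiP x hx.1 hx.2
    by_cases hwin : hi - lo > 2
    · rw [if_pos hwin]
      have hz : cntA A = 0 := by
        rw [hA1]
        apply cntfold_false
        intro x hx
        rintro ⟨w1, w2, -, -⟩
        omega
      rw [hz]
      simp
    · rw [if_neg hwin]
      have hsplit : PySem.List.pyRange 0 (A.length : Int) 1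
          = PySem.List.pyRange 0 (max (lo-1) 0) 1
            ++ PySem.List.pyRange (max (lo-1) 0) (hi+2) 1
            ++ PySem.List.pyRange (hi+2) (A.length : Int) 1 := by
        rw [← PySem.List.pyRange_one_append 0 (max (lo-1) 0) (hi+2) (by omega) (by omega),
            ← PySem.List.pyRange_one_append 0 (hi+2) (A.length : Int) (by omega) (by omega)]
      have hAB : cntA A = cntB A lo hi := by
        rw [hA1, hsplit, List.foldl_append, List.foldl_append]
        rw [cntfold_false _ _ (by
          intro x hx
          rw [PySem.List.mem_pyRange_one] at hx
          rintro ⟨w1, w2, -, -⟩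
          omega) 0]
        rw [cntfold_false _ _ (by
          intro x hx
          rw [PySem.List.mem_pyRange_one] at hx
          rintro ⟨w1, w2, -, -⟩
          omega) _]
        rfl
      rw [hAB]

-- ===== VERDICT (by name: the statement is the Claim_ definition above) =====
theorem solution_spec : Claim_equal_solution := by
  intro A _
  show solution A = solution_alt A
  exact solution_eq A
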